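-- pv_equiv track=rewrite | github.com/searobbersduck/DFSolution | alzheimer/utils.py | kappa_histogram
-- ===== SOURCE A (Python) =====
-- def kappa_histogram(ratings, min_rating=None, max_rating=None):
-- 	"""
-- 	Returns the counts of each type of rating that a rater made
-- 	"""
-- 	if min_rating is None:
-- 		min_rating = min(ratings)
-- 	if max_rating is None:
-- 		max_rating = max(ratings)
-- 	num_ratings = int(max_rating - min_rating + 1)
-- 	hist_ratings = [0 for x in range(num_ratings)]
-- 	for r in ratings:
-- 		hist_ratings[r - min_rating] += 1
-- 	return hist_ratings
-- ===== SOURCE B (Python) =====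
-- def kappa_histogram(ratings, min_rating=None, max_rating=None):
-- 	"""
-- 	Returns the counts of each type of rating that a rater made
-- 	"""
-- 	lo = min(ratings) if min_rating is None else min_rating
-- 	hi = max(ratings) if max_rating is None else max_rating
-- 	hist = [0] * int(hi - lo + 1)
-- 	counts = {}
-- 	for r in ratings:
-- 		counts[r] = counts.get(r, 0) + 1
-- 	for v, c in counts.items():
-- 		hist[v - lo] += c
-- 	return hist
-- ===== Notes on version B (the rewrite author's own statement) =====
-- stated objective: alternative
-- what changed: Instead of incrementing the histogram once per rating, B first aggregates the ratings into a value->count dictionary in one pass and then places each distinct value's multiplicity into the histogram in a single increment, so the histogram is touched once per distinct value rather than once per element.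
import Mathlib
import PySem

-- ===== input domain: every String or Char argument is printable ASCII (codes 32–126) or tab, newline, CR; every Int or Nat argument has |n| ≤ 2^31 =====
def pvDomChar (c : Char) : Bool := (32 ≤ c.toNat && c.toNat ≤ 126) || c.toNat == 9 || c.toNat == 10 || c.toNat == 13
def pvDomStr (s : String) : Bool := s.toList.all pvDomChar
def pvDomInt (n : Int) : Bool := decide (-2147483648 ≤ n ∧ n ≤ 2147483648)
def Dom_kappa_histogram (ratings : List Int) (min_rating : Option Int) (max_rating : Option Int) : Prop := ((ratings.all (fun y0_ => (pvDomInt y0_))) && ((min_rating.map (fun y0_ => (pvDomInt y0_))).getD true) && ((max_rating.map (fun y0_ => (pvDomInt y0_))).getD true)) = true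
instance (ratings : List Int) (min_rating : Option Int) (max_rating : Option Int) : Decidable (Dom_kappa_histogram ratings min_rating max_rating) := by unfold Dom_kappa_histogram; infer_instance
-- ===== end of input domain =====

-- B replaces A's per-element histogram increments by a one-pass value->count dictionary whose
-- multiplicities are then placed into the histogram once per distinct value (objective: alternative).

-- ===== PORT A =====
-- shared defaulting of min_rating/max_rating: min(ratings)/max(ratings); the ValueError on an
-- empty list (min?/max? = none) is excluded by Pre_, so the .getD 0 fallback is never read there
def pvLo (ratings : List Int) (min_rating : Option Int) : Int :=
  match min_rating with
  | none => (PySem.List.min? ratings (fun x => x)).getD 0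
  | some m => m

def pvHi (ratings : List Int) (max_rating : Option Int) : Int :=
  match max_rating with
  | none => (PySem.List.max? ratings (fun x => x)).getD 0
  | some m => m

def kappa_histogram (ratings : List Int) (min_rating : Option Int) (max_rating : Option Int) : List Int :=
  let min_rating' := pvLo ratings min_rating
  let max_rating' := pvHi ratings max_rating
  let num_ratings := max_rating' - min_rating' + 1
  -- hist_ratings = [0 for x in range(num_ratings)]
  let hist_ratings := (PySem.List.pyRange 0 num_ratings 1).map (fun _ => (0 : Int))
  -- for r in ratings: hist_ratings[r - min_rating] += 1
  -- (IndexError = out-of-range index is excluded by Pre_, where pyGetD/pySetD are exact)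
  ratings.foldl
    (fun h r => PySem.List.pySetD h (r - min_rating') (PySem.List.pyGetD h (r - min_rating') 0 + 1))
    hist_ratings

-- ===== PORT B =====
def kappa_histogram_alt (ratings : List Int) (min_rating : Option Int) (max_rating : Option Int) : List Int :=
  -- lo = min(ratings) if min_rating is None else min_rating  (and hi likewise)
  let lo := pvLo ratings min_rating
  let hi := pvHi ratings max_rating
  -- hist = [0] * int(hi - lo + 1)
  let hist := PySem.List.pyRepeat [(0 : Int)] (hi - lo + 1)
  -- counts = {}; for r in ratings: counts[r] = counts.get(r, 0) + 1
  let counts := ratings.foldl (fun d r => d.insert r (d.getD r 0 + 1)) PySem.Dict.empty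
  -- for v, c in counts.items(): hist[v - lo] += c
  counts.items.foldl
    (fun h vc => PySem.List.pySetD h (vc.1 - lo) (PySem.List.pyGetD h (vc.1 - lo) 0 + vc.2))
    hist

-- ===== PRECONDITION & SPEC =====
-- Pre_ excludes exactly the inputs on which the Python A raises: an empty ratings list with a
-- defaulted (None) min or max (ValueError from min()/max()), and any rating whose index
-- r - min_rating falls outside Python's index range of the histogram (IndexError).
def Pre_kappa_histogram (ratings : List Int) (min_rating : Option Int) (max_rating : Option Int) : Prop :=
  (ratings = [] → min_rating ≠ none ∧ max_rating ≠ none) ∧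
  ∀ x ∈ ratings,
    PySem.Raise.InRange (pvHi ratings max_rating - pvLo ratings min_rating + 1).toNat
      (x - pvLo ratings min_rating)

instance (ratings : List Int) (min_rating : Option Int) (max_rating : Option Int) : Decidable (Pre_kappa_histogram ratings min_rating max_rating) := by unfold Pre_kappa_histogram; infer_instance

def pvWitness_kappa_histogram : List Int × Option Int × Option Int := ([0, 1, 2, 1], none, none)

def Spec_kappa_histogram (ratings : List Int) (min_rating : Option Int) (max_rating : Option Int) (out : List Int) : Prop := out = kappa_histogram_alt ratings min_rating max_rating
instance (ratings : List Int) (min_rating : Option Int) (max_rating : Option Int) (out : List Int) : Decidable (Spec_kappa_histogram ratings min_rating max_rating out) := by unfold Spec_kappa_histogram; infer_instance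

-- ===== CLAIM (what is proved, stated in full; the proofs are below) =====
def Claim_equal_kappa_histogram : Prop := ∀ (ratings : List Int) (min_rating : Option Int) (max_rating : Option Int), Dom_kappa_histogram ratings min_rating max_rating → Pre_kappa_histogram ratings min_rating max_rating → Spec_kappa_histogram ratings min_rating max_rating (kappa_histogram ratings min_rating max_rating)

-- ===== LEMMAS AND PROOFS =====

-- one '+= c' update of the histogram at Python index i (defeq to the step of both ports)
def pvBump (h : List Int) (i c : Int) : List Int :=
  PySem.List.pySetD h i (PySem.List.pyGetD h i 0 + c)

theorem pvIdx_lt {n : Nat} {i : Int} {k : Nat} (h : PySem.List.pyIdx? n i = some k) : k < n := by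
  unfold PySem.List.pyIdx? at h
  split_ifs at h <;> simp_all <;> omega

theorem pvBump_none {h : List Int} {i : Int} (hn : PySem.List.pyIdx? h.length i = none) (c : Int) :
    pvBump h i c = h := by
  simp [pvBump, PySem.List.pySetD, PySem.List.pySet?, hn]

theorem pvBump_some {h : List Int} {i : Int} {k : Nat} (hs : PySem.List.pyIdx? h.length i = some k)
    (c : Int) : pvBump h i c = h.set k (h[k]?.getD 0 + c) := by
  simp [pvBump, PySem.List.pySetD, PySem.List.pySet?, PySem.List.pyGetD, PySem.List.pyGet?, hs]

theorem pvBump_length (h : List Int) (i c : Int) : (pvBump h i c).length = h.length := by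
  cases hs : PySem.List.pyIdx? h.length i with
  | none => rw [pvBump_none hs]
  | some k => rw [pvBump_some hs]; simp

theorem pvBump_zero (h : List Int) (i : Int) : pvBump h i 0 = h := by
  cases hs : PySem.List.pyIdx? h.length i with
  | none => exact pvBump_none hs 0
  | some k =>
    rw [pvBump_some hs]
    have hk := pvIdx_lt hs
    simp [List.getElem?_eq_getElem hk, List.set_getElem_self]

theorem pvBump_merge (h : List Int) (i a b : Int) :
    pvBump (pvBump h i a) i b = pvBump h i (a + b) := by
  cases hs : PySem.List.pyIdx? h.length i with
  | none =>
    rw [pvBump_none hs a, pvBump_none hs b, pvBump_none hs (a + b)]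
  | some k =>
    have hk := pvIdx_lt hs
    rw [pvBump_some hs a]
    have hs2 : PySem.List.pyIdx? (h.set k (h[k]?.getD 0 + a)).length i = some k := by
      simpa using hs
    rw [pvBump_some hs2 b, pvBump_some hs (a + b)]
    rw [List.getElem?_set_self (by simpa using hk), List.set_set]
    simp only [Option.getD_some]
    congr 1
    ring

theorem pvBump_comm (h : List Int) (i j a b : Int) :
    pvBump (pvBump h i a) j b = pvBump (pvBump h j b) i a := by
  cases hsi : PySem.List.pyIdx? h.length i with
  | none =>
    have hsi2 : PySem.List.pyIdx? (pvBump h j b).length i = none := by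
      rw [pvBump_length, hsi]
    rw [pvBump_none hsi a, pvBump_none hsi2 a]
  | some k =>
    cases hsj : PySem.List.pyIdx? h.length j with
    | none =>
      have hsj2 : PySem.List.pyIdx? (pvBump h i a).length j = none := by
        rw [pvBump_length, hsj]
      rw [pvBump_none hsj2 b, pvBump_none hsj b]
    | some l =>
      have hk := pvIdx_lt hsi
      have hl := pvIdx_lt hsj
      rw [pvBump_some hsi a, pvBump_some hsj b]
      have hsj2 : PySem.List.pyIdx? (h.set k (h[k]?.getD 0 + a)).length j = some l := by
        simpa using hsj
      have hsi2 : PySem.List.pyIdx? (h.set l (h[l]?.getD 0 + b)).length i = some k := by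
        simpa using hsi
      rw [pvBump_some hsj2 b, pvBump_some hsi2 a]
      by_cases hkl : k = l
      · subst hkl
        rw [List.getElem?_set_self (by simpa using hk),
          List.getElem?_set_self (by simpa using hk)]
        simp only [Option.getD_some, List.set_set]
        congr 1
        ring
      · rw [List.getElem?_set_ne (Ne.symm hkl), List.getElem?_set_ne hkl,
          List.set_comm _ _ hkl]

theorem pvRep_foldl (f : Int → Int) (v : Int) :
    ∀ (m : Nat) (h : List Int),
      (List.replicate m v).foldl (fun h r => pvBump h (f r) 1) h = pvBump h (f v) (m : Int) := by
  intro m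
  induction m with
  | zero => intro h; simp [pvBump_zero]
  | succ m ih =>
    intro h
    rw [List.replicate_succ]
    simp only [List.foldl_cons]
    rw [ih, pvBump_merge]
    norm_num
    ring_nf

-- PySem.Set.update over a list that avoids an element already in the accumulator
theorem pvUpdate_cons_notmem :
    ∀ (l s : List Int) (x : Int), x ∉ l →
      PySem.Set.update (x :: s) l = x :: PySem.Set.update s l := by
  intro l
  induction l with
  | nil => intro s x _; rfl
  | cons y t ih =>
    intro s x hx
    have hyx : (y == x) = false := beq_eq_false_iff_ne.mpr (fun h => hx (by simp [h]))
    have hxt : x ∉ t := fun h => hx (by simp [h])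
    show PySem.Set.update (PySem.Set.add (x :: s) y) t = x :: PySem.Set.update (PySem.Set.add s y) t
    have hadd : PySem.Set.add (x :: s) y = x :: PySem.Set.add s y := by
      simp only [PySem.Set.add, PySem.Set.contains, List.contains_cons, hyx, Bool.false_or]
      split_ifs <;> rfl
    rw [hadd, ih _ x hxt]

-- adding an element-- adding an element already present is a no-op, so it can be filtered out of the update list
theorem pvUpdate_skip :
    ∀ (l s : List Int) (x : Int), x ∈ s →
      PySem.Set.update s l = PySem.Set.update s (l.filter (fun y => !(y == x))) := by
  intro l
  induction l with
  | nil => intro s x _; rfl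
  | cons y t ih =>
    intro s x hx
    by_cases hyx : y = x
    · subst hyx
      have hadd : PySem.Set.add s y = s := by
        simp [PySem.Set.add, PySem.Set.contains, hx]
      simp only [List.filter_cons, beq_self_eq_true, Bool.not_true, Bool.false_eq_true,
        if_false]
      show PySem.Set.update (PySem.Set.add s y) t = _
      rw [hadd]
      exact ih s y hx
    · have hfy : (!(y == x)) = true := by simp [hyx]
      simp only [List.filter_cons, hfy, if_true]
      show PySem.Set.update (PySem.Set.add s y) t
        = PySem.Set.update (PySem.Set.add s y) (t.filter (fun z => !(z == x)))
      exact ih (PySem.Set.add s y) x ((PySem.Set.mem_add s y x).mpr (Or.inl hx))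

theorem pvDedup_cons (x : Int) (t : List Int) :
    PySem.List.dedup (x :: t) = x :: PySem.List.dedup (t.filter (fun y => !(y == x))) := by
  have h1 : PySem.List.dedup (x :: t) = PySem.Set.update [x] t := by
    simp [PySem.List.dedup, PySem.Set.ofList_eq_foldl, PySem.Set.update, PySem.Set.add,
      PySem.Set.contains]
  have h2 : PySem.List.dedup (t.filter (fun y => !(y == x)))
      = PySem.Set.update [] (t.filter (fun y => !(y == x))) := by
    simp [PySem.List.dedup, PySem.Set.ofList_eq_foldl, PySem.Set.update]
  rw [h1, h2, pvUpdate_skip t [x] x (by simp)]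
  exact pvUpdate_cons_notmem _ [] x (by simp)

-- the heart of the proof: per-element unit increments equal per-distinct-value bulk increments
theorem pvGrouped (f : Int → Int) :
    ∀ (xs : List Int) (h0 : List Int),
      xs.foldl (fun h r => pvBump h (f r) 1) h0
        = (PySem.List.dedup xs).foldl (fun h v => pvBump h (f v) ((xs.count v : Int))) h0 := by
  intro xs
  induction hn : xs.length using Nat.strong_induction_on generalizing xs with
  | _ n ih =>
    cases xs with
    | nil => intro h0; rfl
    | cons x t =>
      intro h0
      have rcomm : RightCommutative (fun h r => pvBump h (f r) 1) :=
        ⟨fun h a b => pvBump_comm h (f a) (f b) 1 1⟩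
      have hperm :
          ((x :: t).filter (fun y => y == x) ++ (x :: t).filter (fun y => !(y == x))).Perm
            (x :: t) := List.filter_append_perm _ _
      rw [(hperm.foldl_eq h0).symm, List.foldl_append]
      rw [List.filter_beq x, pvRep_foldl]
      have hhead : (x :: t).filter (fun y => !(y == x)) = t.filter (fun y => !(y == x)) := by
        simp
      rw [hhead]
      set ft := t.filter (fun y => !(y == x)) with hft
      have hlt : ft.length < n := by
        rw [← hn]
        simp only [List.length_cons]
        exact Nat.lt_succ_of_le (List.length_filter_le _ t)
      rw [ih ft.length hlt ft rfl]
      rw [pvDedup_cons]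
      simp only [List.foldl_cons]
      apply PySem.List.foldl_congr_mem
      intro acc v hv
      have hvft : v ∈ ft := (PySem.List.mem_dedup ft v).mp hv
      have hvx' : v ≠ x := by
        rw [hft, List.mem_filter] at hvft
        simpa using hvft.2
      have hcount : ft.count v = (x :: t).count v := by
        rw [hft, List.count_filter (by simp [hvx'])]
        simp [Ne.symm hvx']
      rw [hcount]

-- ===== VERDICT (by name: the statement is the Claim_ definition above) =====
theorem kappa_histogram_spec : Claim_equal_kappa_histogram := by
  unfold Claim_equal_kappa_histogram
  intro ratings min_rating max_rating _ _
  unfold Spec_kappa_histogram kappa_histogram kappa_histogram_alt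
  simp only []
  rw [PySem.Dict.foldl_insert_getD_add_one_eq_counter, PySem.Dict.items_counter,
    List.foldl_map, PySem.List.pyRepeat_singleton]
  have hhist : (PySem.List.pyRange 0 (pvHi ratings max_rating - pvLo ratings min_rating + 1) 1).map
      (fun _ => (0 : Int))
      = List.replicate (pvHi ratings max_rating - pvLo ratings min_rating + 1).toNat (0 : Int) := by
    rw [List.map_const', PySem.List.length_pyRange_one]
    norm_num
  rw [hhist]
  exact pvGrouped (fun r => r - pvLo ratings min_rating) ratings _
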